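-- pv_equiv track=rewrite | github.com/odss/py-odss | odss.common/odss/common/ascii.py | make_ascii_table
-- ===== SOURCE A (Python) =====
-- def _sep_top(sizes):
--     line = "┬".join(["─" * (size + 2) for size in sizes])
--     return f"┌{line}┐"
--
-- def _sep_mid(sizes):
--     line = "┼".join(["─" * (size + 2) for size in sizes])
--     return f"├{line}┤"
--
-- def _sep_bottom(sizes):
--     line = "┴".join(["─" * (size + 2) for size in sizes])
--     return f"└{line}┘"
--
-- def make_ascii_table(title, headers, records):
--     sizes = [len(head) for head in headers]
--     for row, record in enumerate(records):
--         if len(headers) != len(record):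
--             raise ValueError(f"Diffrent size of headers and records (row={row})")
--         for column, value in enumerate(record):
--             svalue = str(value)
--             size = len(svalue)
--             if sizes[column] < size:
--                 sizes[column] = size
--
--     sformat = "│"
--     for size in sizes:
--         sformat += f" {{:<{size}}} │"
--
--     sheader = sformat.format(*headers)
--     buff = [title]
--     buff.append(_sep_top(sizes))
--
--     buff.append(sheader)
--     buff.append(_sep_mid(sizes))
--
--     for record in records:
--         buff.append(sformat.format(*record))
--     buff.append(_sep_bottom(sizes))
--
--     return "\n".join(buff)
-- ===== SOURCE B (Python) =====
-- def _sep_top(sizes):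
--     line = "┬".join(["─" * (size + 2) for size in sizes])
--     return f"┌{line}┐"
--
-- def _sep_mid(sizes):
--     line = "┼".join(["─" * (size + 2) for size in sizes])
--     return f"├{line}┤"
--
-- def _sep_bottom(sizes):
--     line = "┴".join(["─" * (size + 2) for size in sizes])
--     return f"└{line}┘"
--
-- def make_ascii_table(title, headers, records):
--     for row, record in enumerate(records):
--         if len(headers) != len(record):
--             raise ValueError(f"Diffrent size of headers and records (row={row})")
--     sizes = [max([len(head)] + [len(str(rec[i])) for rec in records])
--              for i, head in enumerate(headers)]
--
--     def fmt(cells):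
--         return "│" + "".join(f" {str(c).ljust(s)} │" for c, s in zip(cells, sizes))
--
--     lines = [title, _sep_top(sizes), fmt(headers), _sep_mid(sizes)]
--     lines += [fmt(rec) for rec in records]
--     lines.append(_sep_bottom(sizes))
--     return "\n".join(lines)
-- ===== Notes on version B (the rewrite author's own statement) =====
-- stated objective: alternative
-- what changed: Column widths are computed column-major (one max per column) after a standalone validation pass, instead of A's fused row-major update loop, and each line is built by joining left-justified cells instead of constructing and then applying a '{:<n}' format string.
import Mathlib
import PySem

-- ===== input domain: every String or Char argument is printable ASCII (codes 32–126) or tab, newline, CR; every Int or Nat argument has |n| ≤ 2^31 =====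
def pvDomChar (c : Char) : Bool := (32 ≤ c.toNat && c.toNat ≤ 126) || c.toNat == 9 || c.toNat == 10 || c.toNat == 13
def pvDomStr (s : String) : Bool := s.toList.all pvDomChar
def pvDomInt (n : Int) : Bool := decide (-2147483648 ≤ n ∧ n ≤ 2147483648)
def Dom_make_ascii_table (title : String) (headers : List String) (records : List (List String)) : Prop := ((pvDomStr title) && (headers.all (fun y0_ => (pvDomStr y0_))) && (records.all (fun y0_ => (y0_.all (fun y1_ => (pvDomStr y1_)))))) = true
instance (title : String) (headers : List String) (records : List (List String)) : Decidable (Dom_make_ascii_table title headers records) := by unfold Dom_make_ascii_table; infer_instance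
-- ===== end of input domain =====

-- B replaces A's fused row-major width loop by a column-major max per column and builds each line by
-- joining padded cells instead of constructing and applying a format string (objective: alternative decomposition).


-- ===== PORT A =====
-- shared module helpers _sep_top / _sep_mid / _sep_bottom (identical in Source A and Source B)
def pvSepTop (sizes : List Nat) : List Char :=
  ['┌'] ++ PySem.Chars.join ['┬'] (sizes.map (fun size => List.replicate (size + 2) '─')) ++ ['┐']
def pvSepMid (sizes : List Nat) : List Char :=
  ['├'] ++ PySem.Chars.join ['┼'] (sizes.map (fun size => List.replicate (size + 2) '─')) ++ ['┤']
def pvSepBottom (sizes : List Nat) : List Char :=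
  ['└'] ++ PySem.Chars.join ['┴'] (sizes.map (fun size => List.replicate (size + 2) '─')) ++ ['┘']
-- str.ljust(n) / the '{:<n}' format padding on a str argument (exact: pad on the right with spaces)
def pvLJust (cs : List Char) (n : Nat) : List Char := cs ++ List.replicate (n - cs.length) ' '

def make_ascii_table (title : String) (headers : List String) (records : List (List String)) : String :=
  let sizes0 : List Nat := headers.map (fun head => head.toList.length)
  -- row loop: the ValueError branch (len(headers) != len(record)) is excluded by Pre_;
  -- there sizes[column] is always in range, so getD's default is unreachable
  let sizes := records.foldl (fun sizes record =>
    record.zipIdx.foldl (fun sizes cv =>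
      let size := cv.1.toList.length
      if sizes.getD cv.2 0 < size then sizes.set cv.2 size else sizes) sizes) sizes0
  -- sformat = '│' + ''.join(f' {{:<{size}}} │' for size) and sformat.format(*args), ported fused: the k-th
  -- placeholder is filled with args[k] left-justified to sizes[k] — exact when len(args) = len(sizes) (Pre_);
  -- the values are str, so str(value) = value
  let format := fun (args : List String) =>
    (sizes.zip args).foldl (fun acc p => acc ++ ([' '] ++ pvLJust p.2.toList p.1 ++ [' ', '│'])) ['│']
  let sheader := format headers
  let buff := [title.toList]
  let buff := buff ++ [pvSepTop sizes]
  let buff := buff ++ [sheader]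
  let buff := buff ++ [pvSepMid sizes]
  let buff := records.foldl (fun buff record => buff ++ [format record]) buff
  let buff := buff ++ [pvSepBottom sizes]
  String.ofList (PySem.Chars.join ['\n'] buff)

-- ===== PORT B =====
-- "│" + "".join(f" {str(c).ljust(s)} │" for c, s in zip(cells, sizes))
def pvFmtRow (sizes : List Nat) (cells : List String) : List Char :=
  ['│'] ++ PySem.Chars.join [] ((cells.zip sizes).map (fun p => [' '] ++ pvLJust p.1.toList p.2 ++ [' ', '│']))

def make_ascii_table_alt (title : String) (headers : List String) (records : List (List String)) : String :=
  -- Source B's validation pass raises ValueError exactly outside Pre_ and binds nothing, so it has no port here.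
  -- sizes = [max([len(head)] + [len(str(rec[i])) for rec in records]) for i, head in enumerate(headers)]
  -- (max of the nonempty list ported as the running max over its tail, cf. PySem.List.max?_id_cons;
  --  rec[i] is in range under Pre_, so getD's default is unreachable)
  let sizes : List Nat := headers.zipIdx.map (fun hi =>
    (records.map (fun rec => (rec.getD hi.2 "").toList.length)).foldl max hi.1.toList.length)
  let lines := [title.toList, pvSepTop sizes, pvFmtRow sizes headers, pvSepMid sizes]
    ++ records.map (fun rec => pvFmtRow sizes rec) ++ [pvSepBottom sizes]
  String.ofList (PySem.Chars.join ['\n'] lines)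

-- ===== PRECONDITION & SPEC =====
-- Pre_ excludes exactly the inputs where A (and B) raise ValueError: some record's length differs from the headers'
def Pre_make_ascii_table (title : String) (headers : List String) (records : List (List String)) : Prop :=
  ∀ r ∈ records, r.length = headers.length
instance (title : String) (headers : List String) (records : List (List String)) : Decidable (Pre_make_ascii_table title headers records) := by unfold Pre_make_ascii_table; infer_instance

def pvWitness_make_ascii_table : String × List String × List (List String) :=
  ("t", ["id", "name"], [["1", "ala"], ["22", "b"]])

def Spec_make_ascii_table (title : String) (headers : List String) (records : List (List String)) (out : String) : Prop := out = make_ascii_table_alt title headers records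
instance (title : String) (headers : List String) (records : List (List String)) (out : String) : Decidable (Spec_make_ascii_table title headers records out) := by unfold Spec_make_ascii_table; infer_instance

-- ===== CLAIM (what is proved, stated in full; the proofs are below) =====
def Claim_equal_make_ascii_table : Prop := ∀ (title : String) (headers : List String) (records : List (List String)), Dom_make_ascii_table title headers records → Pre_make_ascii_table title headers records → Spec_make_ascii_table title headers records (make_ascii_table title headers records)

-- ===== LEMMAS AND PROOFS =====

-- A's inner column loop, generalized over an untouched prefix: starting at index |pre| it turns the
-- remaining sizes into the pointwise max with the cell lengths
theorem pv_inner_eq (rec : List String) : ∀ (pre suf : List Nat), suf.length = rec.length →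
    (rec.zipIdx pre.length).foldl (fun sizes cv =>
      let size := cv.1.toList.length
      if sizes.getD cv.2 0 < size then sizes.set cv.2 size else sizes) (pre ++ suf)
    = pre ++ List.zipWith (fun s c => max s c.toList.length) suf rec := by
  induction rec with
  | nil => intro pre suf h; simp at h; simp [h]
  | cons c rest ih =>
    intro pre suf h
    match suf with
    | [] => simp at h
    | s :: suf' =>
      simp only [List.zipIdx_cons, List.foldl_cons, List.zipWith_cons_cons]
      have hstep : (if (pre ++ s :: suf').getD pre.length 0 < c.toList.length
            then (pre ++ s :: suf').set pre.length c.toList.length else pre ++ s :: suf')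
          = pre ++ (max s c.toList.length) :: suf' := by
        rw [show (pre ++ s :: suf').getD pre.length 0 = s from by simp,
            show (pre ++ s :: suf').set pre.length c.toList.length = pre ++ c.toList.length :: suf' from by simp]
        split_ifs with hc
        · rw [Nat.max_eq_right (le_of_lt hc)]
        · rw [Nat.max_eq_left (le_of_not_gt hc)]
      rw [hstep]
      rw [show pre ++ (max s c.toList.length) :: suf' = (pre ++ [max s c.toList.length]) ++ suf' from by simp,
          show pre.length + 1 = (pre ++ [max s c.toList.length]).length from by simp,
          ih (pre ++ [max s c.toList.length]) suf' (by simpa using h)]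
      simp

-- one pass of A's row loop is the pointwise max of the size list with the record's cell lengths
theorem pv_stepA_eq (init : List Nat) (rec : List String) (h : rec.length = init.length) :
    rec.zipIdx.foldl (fun sizes cv =>
      let size := cv.1.toList.length
      if sizes.getD cv.2 0 < size then sizes.set cv.2 size else sizes) init
    = List.zipWith (fun s c => max s c.toList.length) init rec := by
  simpa using pv_inner_eq rec [] init h.symm

theorem pv_sizesA_len (records : List (List String)) : ∀ (init : List Nat),
    (∀ r ∈ records, r.length = init.length) →
    (records.foldl (fun sizes record =>
      record.zipIdx.foldl (fun sizes cv =>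
        let size := cv.1.toList.length
        if sizes.getD cv.2 0 < size then sizes.set cv.2 size else sizes) sizes) init).length = init.length := by
  induction records with
  | nil => intro init h; simp
  | cons rec rest ih =>
    intro init h
    simp only [List.foldl_cons]
    rw [pv_stepA_eq init rec (h rec (by simp))]
    have hlen : (List.zipWith (fun s c => max s (c.toList.length)) init rec).length = init.length := by
      simp [h rec (by simp)]
    rw [ih _ (fun r hr => by rw [hlen]; exact h r (List.mem_cons_of_mem _ hr)), hlen]

-- entry i of A's final size list is the running max (B's per-column computation)
theorem pv_sizesA_getD (records : List (List String)) : ∀ (init : List Nat) (i : Nat), i < init.length →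
    (∀ r ∈ records, r.length = init.length) →
    (records.foldl (fun sizes record =>
      record.zipIdx.foldl (fun sizes cv =>
        let size := cv.1.toList.length
        if sizes.getD cv.2 0 < size then sizes.set cv.2 size else sizes) sizes) init).getD i 0
    = (records.map (fun rec => (rec.getD i "").toList.length)).foldl max (init.getD i 0) := by
  induction records with
  | nil => intro init i hi h; simp
  | cons rec rest ih =>
    intro init i hi h
    simp only [List.foldl_cons, List.map_cons]
    rw [pv_stepA_eq init rec (h rec (by simp))]
    have hlen : (List.zipWith (fun s c => max s (c.toList.length)) init rec).length = init.length := by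
      simp [h rec (by simp)]
    rw [ih _ i (by omega) (fun r hr => by rw [hlen]; exact h r (List.mem_cons_of_mem _ hr))]
    have hz : (List.zipWith (fun s c => max s (c.toList.length)) init rec).getD i 0
        = max (init.getD i 0) ((rec.getD i "").toList.length) := by
      have hj : i < rec.length := by rw [h rec (by simp)]; exact hi
      rw [List.getD_eq_getElem _ _ (by omega), List.getD_eq_getElem _ _ hi, List.getD_eq_getElem _ _ hj]
      simp
    rw [hz]

-- A's size list equals B's size list when every record has the headers' length
theorem pv_sizes_eq (headers : List String) (records : List (List String))
    (h : ∀ r ∈ records, r.length = headers.length) :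
    records.foldl (fun sizes record =>
      record.zipIdx.foldl (fun sizes cv =>
        let size := cv.1.toList.length
        if sizes.getD cv.2 0 < size then sizes.set cv.2 size else sizes) sizes)
      (headers.map (fun head => head.toList.length))
    = headers.zipIdx.map (fun hi =>
        (records.map (fun rec => (rec.getD hi.2 "").toList.length)).foldl max hi.1.toList.length) := by
  have h' : ∀ r ∈ records, r.length = (headers.map (fun head => head.toList.length)).length := by
    simpa using h
  apply List.ext_getElem
  · rw [pv_sizesA_len records _ h']; simp
  · intro i h1 h2
    rw [← List.getD_eq_getElem _ 0 h1, pv_sizesA_getD records _ i (by rw [pv_sizesA_len records _ h'] at h1; exact h1) h']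
    have hih : i < headers.length := by simpa using h2
    rw [List.getD_eq_getElem _ 0 (by simpa using hih)]
    simp

theorem pv_intersperse_nil_flatten (ps : List (List Char)) : (List.intersperse [] ps).flatten = ps.flatten := by
  induction ps with
  | nil => simp
  | cons p ps ih =>
    match ps with
    | [] => simp
    | q :: ps' =>
      have h1 : List.intersperse ([] : List Char) (p :: q :: ps') = p :: [] :: List.intersperse [] (q :: ps') := rfl
      rw [h1, List.flatten_cons, List.flatten_cons, ih, List.flatten_cons]
      simp

theorem pv_join_nil_flatten (ps : List (List Char)) : PySem.Chars.join [] ps = ps.flatten := by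
  simp [PySem.Chars.join, List.intercalate, pv_intersperse_nil_flatten]

theorem pv_zip_swap_flatMap (sizes : List Nat) : ∀ (cells : List String),
    List.flatMap (fun p => [' '] ++ pvLJust p.2.toList p.1 ++ [' ', '│']) (sizes.zip cells)
    = List.flatMap (fun p => [' '] ++ pvLJust p.1.toList p.2 ++ [' ', '│']) (cells.zip sizes) := by
  induction sizes with
  | nil => intro cells; simp
  | cons s rest ih =>
    intro cells
    match cells with
    | [] => simp
    | c :: cells' =>
      simp only [List.zip_cons_cons, List.flatMap_cons, ih cells']

-- A's format fold and B's join of padded cells build the same line (no length hypothesis: zip truncates both alike)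
theorem pv_row_eq (sizes : List Nat) (cells : List String) :
    (sizes.zip cells).foldl (fun acc p => acc ++ ([' '] ++ pvLJust p.2.toList p.1 ++ [' ', '│'])) ['│']
    = pvFmtRow sizes cells := by
  rw [PySem.List.foldl_append_eq_flatMap, pv_zip_swap_flatMap]
  unfold pvFmtRow
  rw [pv_join_nil_flatten, ← List.flatMap_def]

-- ===== VERDICT (by name: the statement is the Claim_ definition above) =====
theorem make_ascii_table_spec : Claim_equal_make_ascii_table := by
  intro title headers records _ hpre
  unfold Spec_make_ascii_table
  simp only [make_ascii_table, make_ascii_table_alt]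
  rw [pv_sizes_eq headers records hpre]
  simp only [pv_row_eq, PySem.List.foldl_append_singleton_eq_map]
  simp
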